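-- pv_equiv track=rewrite | github.com/padyukovai/cock-monitor | cock_monitor/adapters/linux_host.py | parse_ss_tan_state_counts
-- ===== SOURCE A (Python) =====
-- def parse_ss_tan_state_counts(ss_output: str) -> tuple[int, int, int]:
--     """Count ESTAB, SYN-RECV, TIME-WAIT from `ss -tan` stdout (Linux)."""
--     counts: dict[str, int] = {}
--     for line in ss_output.splitlines():
--         parts = line.split()
--         if len(parts) < 1:
--             continue
--         state = parts[0]
--         if state == "State":
--             continue
--         counts[state] = counts.get(state, 0) + 1
--     estab = counts.get("ESTAB", 0)
--     syn = counts.get("SYN-RECV", 0)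
--     tw = counts.get("TIME-WAIT", 0)
--     return estab, syn, tw
-- ===== SOURCE B (Python) =====
-- def parse_ss_tan_state_counts(ss_output: str) -> tuple[int, int, int]:
--     """Count ESTAB, SYN-RECV, TIME-WAIT from `ss -tan` stdout (Linux)."""
--     lines = ss_output.splitlines()
--
--     def count_state(state: str) -> int:
--         return sum(1 for line in lines if line.split()[:1] == [state])
--
--     return count_state("ESTAB"), count_state("SYN-RECV"), count_state("TIME-WAIT")
-- ===== Notes on version B (the rewrite author's own statement) =====
-- stated objective: simpler
-- what changed: Drops the state-count dictionary entirely: three independent filtered counting scans over the split lines (first-token slice compared to the target state) replace the build-a-dict-then-look-up strategy; header and blank lines match no target so no skip logic is needed.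
import Mathlib
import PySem

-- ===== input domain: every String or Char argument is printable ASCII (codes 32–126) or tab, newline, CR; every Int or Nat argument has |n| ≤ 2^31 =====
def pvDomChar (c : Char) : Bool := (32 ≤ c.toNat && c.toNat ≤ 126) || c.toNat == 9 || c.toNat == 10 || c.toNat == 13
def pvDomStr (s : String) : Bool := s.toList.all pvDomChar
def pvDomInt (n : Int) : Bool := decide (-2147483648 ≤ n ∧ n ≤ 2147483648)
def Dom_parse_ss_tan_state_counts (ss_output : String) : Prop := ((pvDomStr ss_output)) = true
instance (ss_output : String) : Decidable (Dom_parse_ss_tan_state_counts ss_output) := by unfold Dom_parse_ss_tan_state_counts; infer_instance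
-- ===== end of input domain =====

-- B replaces A's build-a-count-dict-then-look-up strategy with three independent
-- filtered counting scans over the split lines (objective: simpler).


-- ===== PORT A =====
def parse_ss_tan_state_counts (ss_output : String) : Int × Int × Int :=
  let counts : PySem.Dict String Int :=
    (PySem.Str.splitlines ss_output).foldl (fun counts line =>
      let parts := PySem.Str.split₀ line
      if parts.length < 1 then counts
      else
        let state := PySem.List.pyGetD parts 0 ""   -- parts[0]; in range because the guard ensures parts ≠ []
        if state = "State" then counts
        else counts.insert state (counts.getD state 0 + 1)) PySem.Dict.empty
  let estab := counts.getD "ESTAB" 0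
  let syn := counts.getD "SYN-RECV" 0
  let tw := counts.getD "TIME-WAIT" 0
  (estab, syn, tw)

-- ===== PORT B =====
-- count_state: sum(1 for line in lines if line.split()[:1] == [state])
def pvCountState (lines : List String) (state : String) : Int :=
  (lines.countP (fun line => PySem.List.slice (PySem.Str.split₀ line) none (some 1) == [state]) : Int)

def parse_ss_tan_state_counts_alt (ss_output : String) : Int × Int × Int :=
  let lines := PySem.Str.splitlines ss_output
  (pvCountState lines "ESTAB", pvCountState lines "SYN-RECV", pvCountState lines "TIME-WAIT")

-- ===== PRECONDITION & SPEC =====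
def Spec_parse_ss_tan_state_counts (ss_output : String) (out : Int × Int × Int) : Prop := out = parse_ss_tan_state_counts_alt ss_output
instance (ss_output : String) (out : Int × Int × Int) : Decidable (Spec_parse_ss_tan_state_counts ss_output out) := by unfold Spec_parse_ss_tan_state_counts; infer_instance

-- ===== CLAIM (what is proved, stated in full; the proofs are below) =====
def Claim_equal_parse_ss_tan_state_counts : Prop := ∀ (ss_output : String), Dom_parse_ss_tan_state_counts ss_output → Spec_parse_ss_tan_state_counts ss_output (parse_ss_tan_state_counts ss_output)

-- ===== LEMMAS AND PROOFS =====
-- Invariant of A's dict-building loop: for any state name v other than "State",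
-- the final dict's count at v is the initial count plus B's filtered count of the lines.
theorem pv_count_loop (v : String) (hv : v ≠ "State") :
    ∀ (lines : List String) (d : PySem.Dict String Int),
    (lines.foldl (fun counts line =>
        let parts := PySem.Str.split₀ line
        if parts.length < 1 then counts
        else
          let state := PySem.List.pyGetD parts 0 ""
          if state = "State" then counts
          else counts.insert state (counts.getD state 0 + 1)) d).getD v 0
      = d.getD v 0 + pvCountState lines v := by
  intro lines
  induction lines with
  | nil => intro d; simp [pvCountState]
  | cons line rest ih =>
    intro d
    have hslice1 : ∀ (s : String) (tl : List String),
        PySem.List.slice (s :: tl) none (some 1) = [s] := by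
      intro s tl
      simp [PySem.List.slice_to _ (by norm_num : (0:Int) ≤ 1)]
    rcases h : PySem.Str.split₀ line with _ | ⟨s, tl⟩
    · simp only [List.foldl_cons, h, List.length_nil]
      rw [if_pos (by norm_num), ih]
      simp [pvCountState, List.countP_cons, h]
    · by_cases hs : s = "State"
      · subst hs
        simp only [List.foldl_cons, h, PySem.List.pyGetD_zero_cons]
        rw [if_neg (by simp), if_pos trivial, ih]
        have hne : (PySem.List.slice (PySem.Str.split₀ line) none (some 1) == [v]) = false := by
          rw [h, hslice1]
          simp
          exact fun h' => hv h'.symm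
        simp [pvCountState, hne]
      · simp only [List.foldl_cons, h, PySem.List.pyGetD_zero_cons]
        rw [if_neg (by simp), if_neg hs, ih]
        by_cases hsv : s = v
        · subst hsv
          have htr : (PySem.List.slice (PySem.Str.split₀ line) none (some 1) == [s]) = true := by
            rw [h, hslice1]; simp
          simp [pvCountState, htr,
            PySem.Dict.getD_insert_self]
          ring
        · have hne : (PySem.List.slice (PySem.Str.split₀ line) none (some 1) == [v]) = false := by
            rw [h, hslice1]
            simpa using hsv
          simp [pvCountState, hne,
            PySem.Dict.getD_insert_of_ne d _ _ (Ne.symm hsv)]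

-- ===== VERDICT (by name: the statement is the Claim_ definition above) =====
theorem parse_ss_tan_state_counts_spec : Claim_equal_parse_ss_tan_state_counts := by
  intro ss_output _
  unfold Spec_parse_ss_tan_state_counts parse_ss_tan_state_counts parse_ss_tan_state_counts_alt
  simp only [pv_count_loop "ESTAB" (by decide), pv_count_loop "SYN-RECV" (by decide),
    pv_count_loop "TIME-WAIT" (by decide), PySem.Dict.getD_empty]
  simp
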